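-- pv_equiv track=rewrite | github.com/mutjin08/programmers | 프로그래머스 코딩 테스트 문제 풀이 전략 파이썬편/ch14_PCCP/72138_유전법칙.py | find
-- ===== SOURCE A (Python) =====
-- def find(query):
--     n, p = [i-1 for i in query]
--     stack = []
--     while n>0:
--         stack.append(p%4)
--         n-=1
--         p//=4
--
--     while stack:
--         x = stack.pop()
--         if x==0:
--             return "RR"
--         elif x==3:
--             return "rr"
--     return "Rr"
-- ===== SOURCE B (Python) =====
-- def find(query):
--     n, p = [i - 1 for i in query]
--     pw = 4 ** (n - 1) if n > 0 else 1
--     while n > 0: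
--         d = (p // pw) % 4
--         if d == 0:
--             return "RR"
--         if d == 3:
--             return "rr"
--         n -= 1
--         pw //= 4
--     return "Rr"
-- ===== Notes on version B (the rewrite author's own statement) =====
-- stated objective: alternative
-- what changed: A first builds the whole base-4 digit stack least-significant-first and then scans the popped (most-significant) digits; B scans the most-significant digits directly in one top-down pass with a running power of 4 and early exit, building no stack.
import Mathlib
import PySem

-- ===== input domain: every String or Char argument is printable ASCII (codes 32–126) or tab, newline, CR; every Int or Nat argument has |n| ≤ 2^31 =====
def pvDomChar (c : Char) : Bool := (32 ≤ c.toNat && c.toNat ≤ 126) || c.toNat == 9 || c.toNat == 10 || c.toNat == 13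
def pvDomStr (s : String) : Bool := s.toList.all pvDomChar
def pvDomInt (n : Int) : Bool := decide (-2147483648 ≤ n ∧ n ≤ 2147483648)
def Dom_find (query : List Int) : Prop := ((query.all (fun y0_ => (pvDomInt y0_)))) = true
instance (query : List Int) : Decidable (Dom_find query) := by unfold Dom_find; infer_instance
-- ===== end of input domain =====

-- B replaces A's two-phase "build the full base-4 digit stack bottom-up, then scan it" by a single
-- top-down scan of the most-significant digits with early exit (objective: alternative decomposition).

-- ===== PORT A =====
-- first while loop: stack.append(p%4); n-=1; p//=4   (runs n.toNat times, the stack grows at the end)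
def pvBuild : Nat → Int → List Int → List Int
  | 0, _, st => st
  | k + 1, p, st => pvBuild k (PySem.Int.floordiv p 4) (st ++ [PySem.Int.mod p 4])

-- second while loop: x = stack.pop() (last element first = head of the reversed stack)
def pvPop : List Int → String
  | [] => "Rr"
  | x :: rest => if x = 0 then "RR" else if x = 3 then "rr" else pvPop rest

def find (query : List Int) : String :=
  match query with
  | [a, b] =>
    let n := a - 1
    let p := b - 1
    let stack := pvBuild n.toNat p []
    pvPop stack.reverse
  | _ => ""   -- n, p = [i-1 for i in query] raises ValueError unless len(query) == 2 (outside Pre_)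

-- ===== PORT B =====
-- while n > 0: d = (p // pw) % 4; early return on 0/3; n -= 1; pw //= 4
def pvGo : Nat → Int → Int → String
  | 0, _, _ => "Rr"
  | k + 1, p, pw =>
    let d := PySem.Int.mod (PySem.Int.floordiv p pw) 4
    if d = 0 then "RR" else if d = 3 then "rr" else pvGo k p (PySem.Int.floordiv pw 4)

-- same unpacking 'n, p = [i-1 for i in query]': ValueError unless len(query) == 2 (outside Pre_);
-- written with getD instead of a match so no case analysis is shared with port A
def find_alt (query : List Int) : String :=
  let n := query.getD 0 0 - 1
  let p := query.getD 1 0 - 1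
  let pw : Int := if n > 0 then 4 ^ (n - 1).toNat else 1
  pvGo n.toNat p pw

-- ===== PRECONDITION & SPEC =====
-- Pre_: the unpacking 'n, p = [i-1 for i in query]' raises ValueError unless query has exactly 2 elements.
def Pre_find (query : List Int) : Prop := query.length = 2
instance (query : List Int) : Decidable (Pre_find query) := by unfold Pre_find; infer_instance
def pvWitness_find : List Int := [3, 10]

def Spec_find (query : List Int) (out : String) : Prop := out = find_alt query
instance (query : List Int) (out : String) : Decidable (Spec_find query out) := by unfold Spec_find; infer_instance

-- ===== CLAIM (what is proved, stated in full; the proofs are below) =====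
def Claim_equal_find : Prop := ∀ (query : List Int), Dom_find query → Pre_find query → Spec_find query (find query)

-- ===== LEMMAS AND PROOFS =====

-- the digit list A's first loop produces (least-significant first)
def pvDigits : Nat → Int → List Int
  | 0, _ => []
  | k + 1, p => PySem.Int.mod p 4 :: pvDigits k (PySem.Int.floordiv p 4)

theorem pvBuild_eq (n : Nat) : ∀ (p : Int) (st : List Int),
    pvBuild n p st = st ++ pvDigits n p := by
  induction n with
  | zero => intro p st; simp [pvBuild, pvDigits]
  | succ k ih =>
    intro p st
    simp [pvBuild, pvDigits, ih]

theorem floordiv_floordiv (p : Int) (n : Nat) :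
    PySem.Int.floordiv (PySem.Int.floordiv p 4) (4 ^ n) = PySem.Int.floordiv p (4 ^ (n + 1)) := by
  have h4 : (0:Int) < 4 := by norm_num
  have hn : (0:Int) < 4 ^ n := by positivity
  have hn1 : (0:Int) < 4 ^ (n + 1) := by positivity
  rw [PySem.Int.floordiv_eq_ediv_of_pos h4, PySem.Int.floordiv_eq_ediv_of_pos hn,
    PySem.Int.floordiv_eq_ediv_of_pos hn1, pow_succ']
  exact Int.ediv_ediv_of_nonneg (by norm_num : (0:Int) ≤ 4)

theorem pvDigits_succ (n : Nat) : ∀ (p : Int),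
    pvDigits (n + 1) p = pvDigits n p ++ [PySem.Int.mod (PySem.Int.floordiv p (4 ^ n)) 4] := by
  induction n with
  | zero =>
    intro p
    simp [pvDigits]
  | succ k ih =>
    intro p
    have : pvDigits (k + 1 + 1) p
        = PySem.Int.mod p 4 :: pvDigits (k + 1) (PySem.Int.floordiv p 4) := rfl
    rw [this, ih, floordiv_floordiv]
    simp [pvDigits]

theorem pow_floordiv_four (k : Nat) :
    PySem.Int.floordiv (4 ^ (k + 1)) 4 = 4 ^ k := by
  rw [PySem.Int.floordiv_eq_ediv_of_pos (show (0:Int) < 4 by norm_num), pow_succ]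
  simp

theorem pvPop_eq_pvGo (n : Nat) : ∀ (p : Int),
    pvPop (pvDigits n p).reverse = pvGo n p (4 ^ (n - 1)) := by
  induction n with
  | zero => intro p; simp [pvDigits, pvPop, pvGo]
  | succ k ih =>
    intro p
    rw [pvDigits_succ]
    simp only [List.reverse_append, List.reverse_cons, List.reverse_nil, List.nil_append,
      List.cons_append, Nat.add_sub_cancel]
    have hrec : pvPop (pvDigits k p).reverse = pvGo k p (PySem.Int.floordiv (4 ^ k) 4) := by
      cases k with
      | zero => simp [pvDigits, pvPop, pvGo]
      | succ m =>
        rw [pow_floordiv_four]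
        simpa [Nat.add_sub_cancel] using ih p
    simp only [pvPop, pvGo, hrec]

-- ===== VERDICT (by name: the statement is the Claim_ definition above) =====
theorem find_spec : Claim_equal_find := by
  intro query _ hpre
  match query, hpre with
  | [a, b], _ =>
    unfold Spec_find find find_alt
    simp only [List.getD_cons_zero, List.getD_cons_succ]
    rw [pvBuild_eq, List.nil_append, pvPop_eq_pvGo]
    by_cases hn : a - 1 > 0
    · have ha : (1:Int) < a := by omega
      simp [ha]
    · have h0 : (a - 1).toNat = 0 := by omega
      have ha : ¬ (1:Int) < a := by omega
      simp [h0, ha, pvGo]
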